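-- pv_equiv track=rewrite | github.com/lukatzu/Translator | translator.py | reverse_translate
-- ===== SOURCE A (Python) =====
-- def reverse_translate(text, reverse_large, reverse_small, reverse_numerals_map):
--     # Reverses the translation from the target language back to English using the provided mappings.
--     result = ""
--     for char in text:
--         if char in reverse_numerals_map:
--             result += reverse_numerals_map[char]
--         elif char in reverse_large:
--             result += reverse_large[char]
--         elif char in reverse_small:
--             result += reverse_small[char]
--         else:
--             result += char
--     return result
-- ===== SOURCE B (Python) =====
-- def reverse_translate(text, reverse_large, reverse_small, reverse_numerals_map):
--     # Translate each DISTINCT character ONCE: group the positions of each character,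
--     # look each distinct character up in a single merged priority table
--     # (numerals > large > small, matching the elif chain), then reassemble the
--     # output by position.
--     combined = {**reverse_small, **reverse_large, **reverse_numerals_map}
--     positions = {}
--     for i, ch in enumerate(text):
--         positions.setdefault(ch, []).append(i)
--     pieces = [None] * len(text)
--     for ch, idxs in positions.items():
--         rep = combined.get(ch, ch)
--         for i in idxs:
--             pieces[i] = rep
--     return ''.join(pieces)
-- ===== Notes on version B (the rewrite author's own statement) =====
-- stated objective: alternative
-- what changed: Instead of A's per-character three-dict elif cascade with string +=, B groups the positions of each character, performs ONE lookup per DISTINCT character in a single merged priority table ({**small, **large, **numerals}, later unpacking wins, matching the elif order), and reassembles the output by positional writes into a pieces array joined once.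
import Mathlib
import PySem

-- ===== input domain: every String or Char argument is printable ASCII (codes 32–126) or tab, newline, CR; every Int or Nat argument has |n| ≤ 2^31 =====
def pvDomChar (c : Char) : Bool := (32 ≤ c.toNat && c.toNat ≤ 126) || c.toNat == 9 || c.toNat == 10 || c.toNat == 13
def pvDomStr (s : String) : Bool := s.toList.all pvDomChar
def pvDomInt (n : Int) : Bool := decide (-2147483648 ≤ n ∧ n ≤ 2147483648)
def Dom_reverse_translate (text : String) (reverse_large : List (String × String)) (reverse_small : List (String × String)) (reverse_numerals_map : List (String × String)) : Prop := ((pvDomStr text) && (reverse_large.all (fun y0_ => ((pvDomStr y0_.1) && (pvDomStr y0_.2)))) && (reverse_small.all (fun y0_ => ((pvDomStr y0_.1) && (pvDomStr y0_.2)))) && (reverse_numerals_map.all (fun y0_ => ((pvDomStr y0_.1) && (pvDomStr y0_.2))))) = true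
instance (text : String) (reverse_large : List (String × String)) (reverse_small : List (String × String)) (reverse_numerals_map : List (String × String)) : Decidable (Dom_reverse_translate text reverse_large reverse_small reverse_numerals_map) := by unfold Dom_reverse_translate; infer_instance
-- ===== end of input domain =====

-- ===== PORT A =====
-- B: one lookup per DISTINCT character (group positions, translate each distinct char once
-- in a merged priority table, reassemble by position) instead of A's per-character
-- three-dict elif cascade (objective: alternative).
def reverse_translate (text : String) (reverse_large : List (String × String)) (reverse_small : List (String × String)) (reverse_numerals_map : List (String × String)) : String :=
  String.ofList (text.toList.foldl (fun result c =>
    let s := String.ofList [c]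
    match List.lookup s reverse_numerals_map with
    | some v => result ++ v.toList
    | none =>
      match List.lookup s reverse_large with
      | some v => result ++ v.toList
      | none =>
        match List.lookup s reverse_small with
        | some v => result ++ v.toList
        | none => result ++ [c]) [])

-- ===== PORT B =====
-- the dict a Python assoc list denotes (first occurrence of a key wins, as Python dict lookup does here)
def pvToDict (l : List (String × String)) : PySem.Dict String String :=
  l.foldl (fun d p => d.setdefault p.1 p.2) PySem.Dict.empty

-- {**d, **extra}: re-insert the items of the later dict, overwriting
def pvMergeInto (d : PySem.Dict String String) (l : List (String × String)) : PySem.Dict String String :=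
  l.foldl (fun d p => d.insert p.1 p.2) d

-- combined = {**reverse_small, **reverse_large, **reverse_numerals_map}
def pvCombined (reverse_large reverse_small reverse_numerals_map : List (String × String)) : PySem.Dict String String :=
  pvMergeInto (pvMergeInto (pvToDict reverse_small) (pvToDict reverse_large).items) (pvToDict reverse_numerals_map).items

def reverse_translate_alt (text : String) (reverse_large : List (String × String)) (reverse_small : List (String × String)) (reverse_numerals_map : List (String × String)) : String :=
  let combined := pvCombined reverse_large reverse_small reverse_numerals_map
  let cs := text.toList
  -- positions.setdefault(ch, []).append(i)  ≡  positions[ch] = positions.get(ch, []) + [i]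
  let positions : PySem.Dict Char (List Int) :=
    (PySem.List.enumerate cs).foldl (fun d p => d.modify p.2 [] (fun v => v ++ [p.1])) PySem.Dict.empty
  -- pieces = [None] * len(text); pieces[i] = rep  (each i comes from enumerate, so 0 ≤ i < len: .toNat and .set are exact here)
  let pieces : List (Option (List Char)) :=
    positions.items.foldl (fun ps q =>
      let rep := (combined.getD (String.ofList [q.1]) (String.ofList [q.1])).toList
      q.2.foldl (fun ps i => ps.set i.toNat (some rep)) ps)
      (List.replicate cs.length none)
  -- ''.join(pieces): every slot was filled, so the None default is never used
  String.ofList (pieces.flatMap (fun o => o.getD []))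

-- ===== PRECONDITION & SPEC =====
def Spec_reverse_translate (text : String) (reverse_large : List (String × String)) (reverse_small : List (String × String)) (reverse_numerals_map : List (String × String)) (out : String) : Prop := out = reverse_translate_alt text reverse_large reverse_small reverse_numerals_map
instance (text : String) (reverse_large : List (String × String)) (reverse_small : List (String × String)) (reverse_numerals_map : List (String × String)) (out : String) : Decidable (Spec_reverse_translate text reverse_large reverse_small reverse_numerals_map out) := by unfold Spec_reverse_translate; infer_instance

-- ===== CLAIM (what is proved, stated in full; the proofs are below) =====
def Claim_equal_reverse_translate : Prop := ∀ (text : String) (reverse_large : List (String × String)) (reverse_small : List (String × String)) (reverse_numerals_map : List (String × String)), Dom_reverse_translate text reverse_large reverse_small reverse_numerals_map → Spec_reverse_translate text reverse_large reverse_small reverse_numerals_map (reverse_translate text reverse_large reverse_small reverse_numerals_map)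

-- ===== LEMMAS AND PROOFS =====

-- the per-character translation both programs realise
def pvF (reverse_large reverse_small reverse_numerals_map : List (String × String)) (c : Char) : List Char :=
  ((pvCombined reverse_large reverse_small reverse_numerals_map).getD (String.ofList [c]) (String.ofList [c])).toList

-- the positions of ch in cs, as the Int indices enumerate produces
def pvIdxs (cs : List Char) (ch : Char) : List Int :=
  ((PySem.List.enumerate cs).filter (fun p => p.2 == ch)).map (·.1)

theorem lookup_cons (k a b : String) (rest : List (String × String)) :
    List.lookup k ((a, b) :: rest) = if k = a then some b else List.lookup k rest := by
  by_cases h : k = a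
  · subst h; simp [List.lookup]
  · have hb : (k == a) = false := by simp [h]
    simp [List.lookup, hb, h]

theorem lookup_eq_none_of_not_mem_fst (k : String) (l : List (String × String))
    (h : k ∉ l.map (·.1)) : List.lookup k l = none := by
  induction l with
  | nil => rfl
  | cons p rest ih =>
    rcases p with ⟨a, b⟩
    simp only [List.map_cons, List.mem_cons, not_or] at h
    rw [lookup_cons, if_neg h.1]
    exact ih h.2

theorem pvMergeInto_cons (d : PySem.Dict String String) (a b : String) (rest : List (String × String)) :
    pvMergeInto d ((a, b) :: rest) = pvMergeInto (d.insert a b) rest := rfl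

-- First-match lookup on a Dict's items list is the Dict's own lookup.
theorem lookup_items_eq_get? (d : PySem.Dict String String) (k : String) :
    List.lookup k d.items = d.get? k := by
  rcases d with ⟨items⟩
  induction items with
  | nil => rfl
  | cons p rest ih =>
    rcases p with ⟨a, b⟩
    rw [PySem.Dict.get?_mk_cons]
    rw [show (PySem.Dict.mk ((a, b) :: rest)).items = (a, b) :: rest from rfl, lookup_cons]
    by_cases h : k = a
    · subst h; simp
    · rw [if_neg h]
      have h2 : (a == k) = false := by simp [Ne.symm h]
      rw [h2]
      simpa using ih

-- pvToDict keeps the FIRST occurrence of each key: its lookup is List.lookup.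
theorem get?_foldl_setdefault (l : List (String × String)) (d : PySem.Dict String String) (k : String) :
    (l.foldl (fun d p => d.setdefault p.1 p.2) d).get? k
      = (d.get? k).orElse (fun _ => List.lookup k l) := by
  induction l generalizing d with
  | nil => cases h : d.get? k <;> simp [h, Option.orElse]
  | cons p rest ih =>
    rcases p with ⟨a, b⟩
    simp only [List.foldl_cons]
    rw [ih, lookup_cons]
    by_cases h : k = a
    · subst h
      rw [PySem.Dict.get?_setdefault_self, if_pos rfl]
      cases hd : d.get? k <;> simp [Option.orElse]
    · rw [PySem.Dict.get?_setdefault_of_ne d b h, if_neg h]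

theorem get?_pvToDict (l : List (String × String)) (k : String) :
    (pvToDict l).get? k = List.lookup k l := by
  rw [pvToDict, get?_foldl_setdefault]
  simp [Option.orElse]

theorem nodup_keys_foldl_setdefault (l : List (String × String)) (d : PySem.Dict String String)
    (h : d.keys.Nodup) : (l.foldl (fun d p => d.setdefault p.1 p.2) d).keys.Nodup := by
  induction l generalizing d with
  | nil => exact h
  | cons p rest ih =>
    simp only [List.foldl_cons]
    apply ih
    by_cases hc : d.contains p.1
    · rw [PySem.Dict.setdefault_of_contains d p.2 hc]; exact h
    · rw [PySem.Dict.setdefault_of_not_contains d p.2 (by simpa using hc)]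
      exact PySem.Dict.nodup_keys_insert d p.1 p.2 h

theorem nodup_keys_pvToDict (l : List (String × String)) : (pvToDict l).keys.Nodup :=
  nodup_keys_foldl_setdefault l PySem.Dict.empty (by simp)

-- Re-inserting a list of pairs containing no binding for k leaves get? at k unchanged.
theorem get?_pvMergeInto_of_lookup_none (l : List (String × String)) (d : PySem.Dict String String)
    (k : String) (h : List.lookup k l = none) : (pvMergeInto d l).get? k = d.get? k := by
  induction l generalizing d with
  | nil => rfl
  | cons p rest ih =>
    rcases p with ⟨a, b⟩
    rw [lookup_cons] at h
    by_cases hk : k = a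
    · simp [hk] at h
    · rw [if_neg hk] at h
      rw [pvMergeInto_cons, ih _ h, PySem.Dict.get?_insert]
      rw [if_neg hk]

-- Re-inserting a duplicate-key-free list binding k to v makes get? at k return v.
theorem get?_pvMergeInto_of_lookup_some (l : List (String × String)) (d : PySem.Dict String String)
    (k : String) (v : String) (hnd : (l.map (·.1)).Nodup) (h : List.lookup k l = some v) :
    (pvMergeInto d l).get? k = some v := by
  induction l generalizing d with
  | nil => simp [List.lookup] at h
  | cons p rest ih =>
    rcases p with ⟨a, b⟩
    simp only [List.map_cons, List.nodup_cons] at hnd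
    rw [lookup_cons] at h
    rw [pvMergeInto_cons]
    by_cases hk : k = a
    · subst hk
      rw [if_pos rfl] at h
      have hrest : List.lookup k rest = none :=
        lookup_eq_none_of_not_mem_fst k rest hnd.1
      rw [get?_pvMergeInto_of_lookup_none _ _ _ hrest, PySem.Dict.get?_insert, if_pos rfl, h]
    · rw [if_neg hk] at h
      exact ih _ hnd.2 h

-- keys of a dict are the first components of its items
theorem map_fst_items (d : PySem.Dict String String) : d.items.map (·.1) = d.keys := rfl

-- The merged table realises the elif priority: numerals, then large, then small.
theorem get?_combined (rl rs rn : List (String × String)) (k : String) :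
    (pvCombined rl rs rn).get? k
      = ((List.lookup k rn).orElse (fun _ => (List.lookup k rl).orElse (fun _ => List.lookup k rs))) := by
  have hndl : ((pvToDict rl).items.map (·.1)).Nodup := by
    rw [map_fst_items]; exact nodup_keys_pvToDict rl
  have hndn : ((pvToDict rn).items.map (·.1)).Nodup := by
    rw [map_fst_items]; exact nodup_keys_pvToDict rn
  unfold pvCombined
  cases hn : List.lookup k rn with
  | some v =>
    rw [get?_pvMergeInto_of_lookup_some _ _ _ v hndn
      (by rw [lookup_items_eq_get?, get?_pvToDict, hn])]
    simp [Option.orElse]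
  | none =>
    rw [get?_pvMergeInto_of_lookup_none _ _ _
      (by rw [lookup_items_eq_get?, get?_pvToDict, hn])]
    cases hl : List.lookup k rl with
    | some v =>
      rw [get?_pvMergeInto_of_lookup_some _ _ _ v hndl
        (by rw [lookup_items_eq_get?, get?_pvToDict, hl])]
      simp [Option.orElse]
    | none =>
      rw [get?_pvMergeInto_of_lookup_none _ _ _
        (by rw [lookup_items_eq_get?, get?_pvToDict, hl])]
      rw [get?_pvToDict]
      simp [Option.orElse]

-- per-character agreement of A's cascade with the merged-table lookup
theorem per_char (rl rs rn : List (String × String)) (s : String) :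
    (match List.lookup s rn with
      | some v => v.toList
      | none =>
        match List.lookup s rl with
        | some v => v.toList
        | none =>
          match List.lookup s rs with
          | some v => v.toList
          | none => s.toList)
    = ((pvCombined rl rs rn).getD s s).toList := by
  rw [PySem.Dict.getD_eq_get?_getD, get?_combined]
  cases List.lookup s rn with
  | some v => simp [Option.orElse]
  | none =>
    cases List.lookup s rl with
    | some v => simp [Option.orElse]
    | none =>
      cases List.lookup s rs with
      | some v => simp [Option.orElse]
      | none => simp [Option.orElse]

-- A computes the flatMap of the per-character translation.
theorem A_flat (text : String) (rl rs rn : List (String × String)) :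
    reverse_translate text rl rs rn = String.ofList (text.toList.flatMap (pvF rl rs rn)) := by
  unfold reverse_translate
  congr 1
  rw [show (fun (result : List Char) (c : Char) =>
      match List.lookup (String.ofList [c]) rn with
      | some v => result ++ v.toList
      | none =>
        match List.lookup (String.ofList [c]) rl with
        | some v => result ++ v.toList
        | none =>
          match List.lookup (String.ofList [c]) rs with
          | some v => result ++ v.toList
          | none => result ++ [c])
    = (fun result c => result ++ pvF rl rs rn c) from by
      funext result c
      rw [show pvF rl rs rn c = ((pvCombined rl rs rn).getD (String.ofList [c]) (String.ofList [c])).toList from rfl,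
        ← per_char rl rs rn (String.ofList [c])]
      cases List.lookup (String.ofList [c]) rn <;>
        cases List.lookup (String.ofList [c]) rl <;>
        cases List.lookup (String.ofList [c]) rs <;> simp [String.toList_ofList]
    ]
  rw [PySem.List.foldl_append_eq_flatMap]
  rfl

-- ----- B side: the grouping dict -----

-- setdefault/append grouping over enumerate yields exactly the index lists pvIdxs
theorem positions_getD (cs : List Char) (ch : Char) :
    ((PySem.List.enumerate cs).foldl (fun d p => d.modify p.2 [] (fun v => v ++ [p.1]))
        (PySem.Dict.empty : PySem.Dict Char (List Int))).getD ch []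
      = pvIdxs cs ch := by
  rw [show (PySem.List.enumerate cs).foldl (fun d p => d.modify p.2 [] (fun v => v ++ [p.1]))
        (PySem.Dict.empty : PySem.Dict Char (List Int))
      = ((PySem.List.enumerate cs).map (fun p => (p.2, p.1))).foldl
          (fun d q => d.modify q.1 [] (fun v => v ++ [q.2])) PySem.Dict.empty from by
        rw [List.foldl_map]]
  rw [PySem.Dict.getD_foldl_modify_append]
  simp [pvIdxs, PySem.Dict.getD_empty, List.filter_map, List.map_map, Function.comp_def]

theorem positions_keys (cs : List Char) :
    ((PySem.List.enumerate cs).foldl (fun d p => d.modify p.2 [] (fun v => v ++ [p.1]))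
        (PySem.Dict.empty : PySem.Dict Char (List Int))).keys = PySem.Set.ofList cs := by
  rw [PySem.Dict.keys_foldl_modify_key (PySem.List.enumerate cs) (fun p => p.2) []
    (fun _ p => (fun v => v ++ [p.1])) PySem.Dict.empty]
  rw [PySem.List.map_snd_enumerate]
  simp [PySem.Set.update, PySem.Set.ofList_eq_foldl, PySem.Dict.keys_empty]

theorem positions_nodup_keys (cs : List Char) :
    ((PySem.List.enumerate cs).foldl (fun d p => d.modify p.2 [] (fun v => v ++ [p.1]))
        (PySem.Dict.empty : PySem.Dict Char (List Int))).keys.Nodup := by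
  exact PySem.Dict.nodup_keys_foldl_modify_key (PySem.List.enumerate cs) (fun p => p.2) []
    (fun _ p => (fun v => v ++ [p.1])) PySem.Dict.empty (by simp)

theorem mem_pvIdxs (cs : List Char) (ch : Char) (j : Nat) (hj : j < cs.length) :
    ((j : Int) ∈ pvIdxs cs ch) ↔ cs[j] = ch := by
  simp only [pvIdxs, List.mem_map, List.mem_filter, PySem.List.mem_enumerate_iff]
  constructor
  · rintro ⟨p, ⟨⟨k, hk, rfl⟩, hc⟩, h1⟩
    simp only [zero_add] at h1 hc
    have : k = j := by exact_mod_cast h1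
    subst this
    simpa using hc
  · intro h
    exact ⟨((j : Int), cs[j]), ⟨⟨j, hj, by simp⟩, by simpa using h⟩, rfl⟩

theorem pvIdxs_nonneg_lt (cs : List Char) (ch : Char) :
    ∀ i ∈ pvIdxs cs ch, 0 ≤ i ∧ i.toNat < cs.length := by
  intro i hi
  simp only [pvIdxs, List.mem_map, List.mem_filter, PySem.List.mem_enumerate_iff] at hi
  rcases hi with ⟨p, ⟨⟨k, hk, rfl⟩, _⟩, h1⟩
  subst h1
  simp
  omega

-- ----- B side: the fill loop -----

theorem fill_length (v : Option (List Char)) (lst : List Int) (ps : List (Option (List Char))) :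
    (lst.foldl (fun ps i => ps.set i.toNat v) ps).length = ps.length := by
  induction lst generalizing ps with
  | nil => rfl
  | cons i t ih => simp [List.foldl_cons, ih]

theorem fill_get (v : Option (List Char)) (lst : List Int) (ps : List (Option (List Char)))
    (h0 : ∀ i ∈ lst, 0 ≤ i ∧ i.toNat < ps.length) (j : Nat) :
    (lst.foldl (fun ps i => ps.set i.toNat v) ps)[j]?
      = if (j : Int) ∈ lst then some v else ps[j]? := by
  induction lst generalizing ps with
  | nil => simp
  | cons i t ih =>
    obtain ⟨hi0, hilt⟩ := h0 i (List.mem_cons_self ..)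
    simp only [List.foldl_cons]
    rw [ih (ps.set i.toNat v) (by intro x hx; simpa using h0 x (List.mem_cons_of_mem _ hx))]
    by_cases ht : (j : Int) ∈ t
    · simp [ht]
    · rw [if_neg ht]
      by_cases hij : (j : Int) = i
      · have hjj : i.toNat = j := by omega
        subst hjj
        rw [if_pos (List.mem_cons.2 (Or.inl hij))]
        exact List.getElem?_set_self hilt
      · have hne : i.toNat ≠ j := by omega
        rw [List.getElem?_set_ne hne]
        have : ¬ (j : Int) ∈ i :: t := by simp [ht, hij]
        rw [if_neg this]

-- the outer loop: each distinct character's positions are filled with its translation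
theorem outer_fill (cs : List Char) (g : Char → List Char) (K : List Char)
    (ps : List (Option (List Char))) (hlen : ps.length = cs.length) (j : Nat) :
    (K.foldl (fun ps ch => (pvIdxs cs ch).foldl (fun ps i => ps.set i.toNat (some (g ch))) ps) ps)[j]?
      = if h : j < cs.length then (if cs[j] ∈ K then some (some (g cs[j])) else ps[j]?) else ps[j]? := by
  induction K generalizing ps with
  | nil =>
    by_cases h : j < cs.length <;> simp [h]
  | cons ch rest ih =>
    simp only [List.foldl_cons]
    rw [ih _ (by rw [fill_length, hlen])]
    rw [fill_get _ _ _ (by intro i hi; have := pvIdxs_nonneg_lt cs ch i hi; omega)]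
    by_cases h : j < cs.length
    · rw [dif_pos h, dif_pos h]
      simp only [mem_pvIdxs cs ch j h]
      by_cases hrest : cs[j] ∈ rest
      · simp [hrest]
      · by_cases hch : cs[j] = ch
        · simp [hch]
        · simp [hrest, hch]
    · rw [dif_neg h, dif_neg h]
      rw [if_neg (by
        intro hmem
        have := pvIdxs_nonneg_lt cs ch (j : Int) hmem
        omega)]

-- the filled pieces array is exactly the per-character translations, in order
theorem pieces_eq (cs : List Char) (g : Char → List Char) :
    (((PySem.List.enumerate cs).foldl (fun d p => d.modify p.2 [] (fun v => v ++ [p.1]))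
        (PySem.Dict.empty : PySem.Dict Char (List Int))).items.foldl
      (fun ps q => q.2.foldl (fun ps i => ps.set i.toNat (some (g q.1))) ps)
      (List.replicate cs.length none))
    = cs.map (fun c => some (g c)) := by
  set d := (PySem.List.enumerate cs).foldl (fun d p => d.modify p.2 [] (fun v => v ++ [p.1]))
      (PySem.Dict.empty : PySem.Dict Char (List Int)) with hd
  have hitems : d.items = d.keys.map (fun k => (k, d.getD k [])) :=
    PySem.Dict.items_eq_map_keys d (positions_nodup_keys cs) []
  rw [hitems, List.foldl_map, positions_keys]
  have hstep : (fun (ps : List (Option (List Char))) (k : Char) =>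
      (d.getD k []).foldl (fun ps i => ps.set i.toNat (some (g k))) ps)
      = (fun ps k => (pvIdxs cs k).foldl (fun ps i => ps.set i.toNat (some (g k))) ps) := by
    funext ps k
    rw [hd, positions_getD]
  rw [hstep]
  apply List.ext_getElem?
  intro j
  rw [outer_fill cs g (PySem.Set.ofList cs) _ (by simp) j]
  by_cases h : j < cs.length
  · rw [dif_pos h]
    rw [if_pos (by rw [PySem.Set.mem_ofList]; exact List.getElem_mem h)]
    rw [List.getElem?_map, List.getElem?_eq_getElem h]
    rfl
  · rw [dif_neg h]
    rw [List.getElem?_eq_none (by simpa using h), List.getElem?_eq_none (by simp; omega)]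

-- B computes the same flatMap of the per-character translation.
theorem B_flat (text : String) (rl rs rn : List (String × String)) :
    reverse_translate_alt text rl rs rn = String.ofList (text.toList.flatMap (pvF rl rs rn)) := by
  dsimp only [reverse_translate_alt]
  congr 1
  rw [pieces_eq text.toList (fun c => ((pvCombined rl rs rn).getD (String.ofList [c]) (String.ofList [c])).toList)]
  simp [List.flatMap_map]
  rfl

-- ===== VERDICT (by name: the statement is the Claim_ definition above) =====
theorem reverse_translate_spec : Claim_equal_reverse_translate := by
  intro text rl rs rn _
  unfold Spec_reverse_translate
  rw [A_flat, B_flat]
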